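-- pv_equiv track=rewrite | github.com/heidekrauttt/heidekrauttt.github.io | webapps/webapp_2.py | use_coordinates
-- ===== SOURCE A (Python) =====
-- def use_coordinates(axiom):
--     start_g = 0
--     start_h = 0
--     for symbol in axiom:
--         if symbol == "g":
--             start_g = start_g + 25
--         if symbol == "h":
--             start_h = start_h + 10
--         if symbol == "i":
--             start_g = start_g - 25
--         if symbol == "k":
--             start_h = start_h - 10
--     return start_g, start_h
-- ===== SOURCE B (Python) =====
-- def use_coordinates(axiom):
--     start_g = 25 * (axiom.count("g") - axiom.count("i"))
--     start_h = 10 * (axiom.count("h") - axiom.count("k"))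
--     return start_g, start_h
-- ===== Notes on version B (the rewrite author's own statement) =====
-- stated objective: simpler
-- what changed: Replaced the accumulating per-symbol loop with a closed form built from four str.count scans: 25*(count('g')-count('i')) and 10*(count('h')-count('k')).
import Mathlib
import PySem

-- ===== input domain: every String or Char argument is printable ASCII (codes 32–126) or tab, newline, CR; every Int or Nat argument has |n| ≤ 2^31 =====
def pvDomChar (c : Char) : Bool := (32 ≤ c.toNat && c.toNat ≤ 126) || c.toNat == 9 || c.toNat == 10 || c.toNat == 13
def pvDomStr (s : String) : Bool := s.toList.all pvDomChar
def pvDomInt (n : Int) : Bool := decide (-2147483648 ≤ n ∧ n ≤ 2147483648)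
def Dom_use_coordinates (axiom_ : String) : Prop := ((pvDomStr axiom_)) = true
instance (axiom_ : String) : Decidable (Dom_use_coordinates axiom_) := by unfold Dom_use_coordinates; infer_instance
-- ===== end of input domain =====

-- B replaces A's accumulating per-symbol loop by a closed form from four symbol counts (objective: simpler).

-- ===== PORT A =====
def use_coordinates (axiom_ : String) : Int × Int :=
  axiom_.toList.foldl (fun (st : Int × Int) symbol =>
    let st := if symbol == 'g' then (st.1 + 25, st.2) else st
    let st := if symbol == 'h' then (st.1, st.2 + 10) else st
    let st := if symbol == 'i' then (st.1 - 25, st.2) else st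
    let st := if symbol == 'k' then (st.1, st.2 - 10) else st
    st) (0, 0)

-- ===== PORT B =====
def use_coordinates_alt (axiom_ : String) : Int × Int :=
  (25 * ((PySem.Str.count axiom_ "g" : Int) - (PySem.Str.count axiom_ "i" : Int)),
   10 * ((PySem.Str.count axiom_ "h" : Int) - (PySem.Str.count axiom_ "k" : Int)))

-- ===== PRECONDITION & SPEC =====
def Spec_use_coordinates (axiom_ : String) (out : Int × Int) : Prop := out = use_coordinates_alt axiom_
instance (axiom_ : String) (out : Int × Int) : Decidable (Spec_use_coordinates axiom_ out) := by unfold Spec_use_coordinates; infer_instance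

-- ===== CLAIM (what is proved, stated in full; the proofs are below) =====
def Claim_equal_use_coordinates : Prop := ∀ (axiom_ : String), Dom_use_coordinates axiom_ → Spec_use_coordinates axiom_ (use_coordinates axiom_)

-- ===== LEMMAS AND PROOFS =====

-- Python's str.count with a single-character needle counts that character's occurrences.
theorem chars_count_go_single (c : Char) (l : List Char) (fuel acc : Nat)
    (h : l.length ≤ fuel) :
    PySem.Chars.count.go [c] fuel l acc = acc + l.count c := by
  induction l generalizing fuel acc with
  | nil => cases fuel <;> simp [PySem.Chars.count.go]
  | cons x t ih =>
    cases fuel with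
    | zero => simp at h
    | succ n =>
      simp only [List.length_cons, Nat.succ_le_succ_iff] at h
      by_cases hx : x = c
      · subst hx
        simp [PySem.Chars.count.go, List.isPrefixOf, ih _ _ h]
        omega
      · simp [PySem.Chars.count.go, List.isPrefixOf, hx, ih _ _ h, Ne.symm hx]

theorem str_count_single (s : String) (c : Char) :
    PySem.Str.count s (String.ofList [c]) = s.toList.count c := by
  have : PySem.Chars.count s.toList [c] = s.toList.count c := by
    simp [PySem.Chars.count, chars_count_go_single]
  have h2 : (String.ofList [c]).toList = [c] := by simp
  unfold PySem.Str.count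
  rw [h2]; exact this

theorem fold_eq (l : List Char) (g h : Int) :
    l.foldl (fun (st : Int × Int) symbol =>
      let st := if symbol == 'g' then (st.1 + 25, st.2) else st
      let st := if symbol == 'h' then (st.1, st.2 + 10) else st
      let st := if symbol == 'i' then (st.1 - 25, st.2) else st
      let st := if symbol == 'k' then (st.1, st.2 - 10) else st
      st) (g, h)
    = (g + 25 * ((l.count 'g' : Int) - (l.count 'i' : Int)),
       h + 10 * ((l.count 'h' : Int) - (l.count 'k' : Int))) := by
  induction l generalizing g h with
  | nil => simp
  | cons x t ih =>
    simp only [List.foldl_cons]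
    by_cases hg : x = 'g' <;> by_cases hh : x = 'h' <;> by_cases hi : x = 'i' <;>
      by_cases hk : x = 'k' <;>
      simp_all <;> ring

-- ===== VERDICT (by name: the statement is the Claim_ definition above) =====
theorem use_coordinates_spec : Claim_equal_use_coordinates := by
  intro axiom_ _
  unfold Spec_use_coordinates use_coordinates use_coordinates_alt
  rw [fold_eq]
  have hg := str_count_single axiom_ 'g'
  have hh := str_count_single axiom_ 'h'
  have hi := str_count_single axiom_ 'i'
  have hk := str_count_single axiom_ 'k'
  simp only [show ("g" : String) = String.ofList ['g'] from rfl,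
    show ("h" : String) = String.ofList ['h'] from rfl,
    show ("i" : String) = String.ofList ['i'] from rfl,
    show ("k" : String) = String.ofList ['k'] from rfl, hg, hh, hi, hk]
  simp
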